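-- pv_equiv track=rewrite | github.com/automl/learna_tools | learna_tools/liblearna/environment.py | change_encoding
-- ===== SOURCE A (Python) =====
-- def change_encoding(structure):
--     structure = ["(" if x == "(0" else x for x in structure]
--     structure = [")" if x == ")0" else x for x in structure]
--     structure = ["[" if x == "(1" else x for x in structure]
--     structure = ["]" if x == ")1" else x for x in structure]
--     structure = ["{" if x == "(2" else x for x in structure]
--     structure = ["}" if x == ")2" else x for x in structure]
--     structure = ["<" if x == "(3" else x for x in structure]
--     structure = [">" if x == ")3" else x for x in structure]
--     return structure
-- ===== SOURCE B (Python) =====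
-- _BRACKETS = {"(0": "(", ")0": ")", "(1": "[", ")1": "]",
--              "(2": "{", ")2": "}", "(3": "<", ")3": ">"}
--
-- def change_encoding(structure):
--     return [_BRACKETS.get(x, x) for x in structure]
-- ===== Notes on version B (the rewrite author's own statement) =====
-- stated objective: simpler
-- what changed: Replaces eight sequential full-list rewrite passes by one pass with a single token-to-bracket lookup table with identity default.
import Mathlib
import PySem

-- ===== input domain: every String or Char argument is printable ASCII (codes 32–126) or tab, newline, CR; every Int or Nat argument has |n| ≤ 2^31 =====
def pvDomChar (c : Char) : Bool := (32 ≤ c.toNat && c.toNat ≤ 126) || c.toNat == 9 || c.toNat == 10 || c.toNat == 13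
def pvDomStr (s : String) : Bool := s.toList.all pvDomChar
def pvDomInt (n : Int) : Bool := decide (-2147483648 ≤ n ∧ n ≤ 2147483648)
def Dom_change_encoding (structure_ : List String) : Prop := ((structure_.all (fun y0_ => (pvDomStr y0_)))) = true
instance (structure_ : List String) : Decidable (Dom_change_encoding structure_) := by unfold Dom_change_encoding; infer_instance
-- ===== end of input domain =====

-- B replaces A's eight sequential full-list rewrite passes with a single pass over
-- one token→bracket lookup table (identity default); objective: simpler.

-- ===== PORT A =====
def change_encoding (structure_ : List String) : List String :=
  let s1 := structure_.map (fun x => if x == "(0" then "(" else x)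
  let s2 := s1.map (fun x => if x == ")0" then ")" else x)
  let s3 := s2.map (fun x => if x == "(1" then "[" else x)
  let s4 := s3.map (fun x => if x == ")1" then "]" else x)
  let s5 := s4.map (fun x => if x == "(2" then "{" else x)
  let s6 := s5.map (fun x => if x == ")2" then "}" else x)
  let s7 := s6.map (fun x => if x == "(3" then "<" else x)
  let s8 := s7.map (fun x => if x == ")3" then ">" else x)
  s8

-- ===== PORT B =====
def pvBrackets : PySem.Dict String String :=
  PySem.Dict.mk
    [("(0", "("), (")0", ")"), ("(1", "["), (")1", "]"),
     ("(2", "{"), (")2", "}"), ("(3", "<"), (")3", ">")]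

def change_encoding_alt (structure_ : List String) : List String :=
  structure_.map (fun x => PySem.Dict.getD pvBrackets x x)

-- ===== PRECONDITION & SPEC =====
def Spec_change_encoding (structure_ : List String) (out : List String) : Prop := out = change_encoding_alt structure_
instance (structure_ : List String) (out : List String) : Decidable (Spec_change_encoding structure_ out) := by unfold Spec_change_encoding; infer_instance

-- ===== CLAIM (what is proved, stated in full; the proofs are below) =====
def Claim_equal_change_encoding : Prop := ∀ (structure_ : List String), Dom_change_encoding structure_ → Spec_change_encoding structure_ (change_encoding structure_)

-- ===== LEMMAS AND PROOFS =====
theorem change_encoding_pointwise (x : String) :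
    (let a1 := if x == "(0" then "(" else x
     let a2 := if a1 == ")0" then ")" else a1
     let a3 := if a2 == "(1" then "[" else a2
     let a4 := if a3 == ")1" then "]" else a3
     let a5 := if a4 == "(2" then "{" else a4
     let a6 := if a5 == ")2" then "}" else a5
     let a7 := if a6 == "(3" then "<" else a6
     if a7 == ")3" then ">" else a7) = PySem.Dict.getD pvBrackets x x := by
  by_cases h0 : "(0" = x
  · subst h0; decide
  by_cases h1 : ")0" = x
  · subst h1; decide
  by_cases h2 : "(1" = x
  · subst h2; decide
  by_cases h3 : ")1" = x
  · subst h3; decide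
  by_cases h4 : "(2" = x
  · subst h4; decide
  by_cases h5 : ")2" = x
  · subst h5; decide
  by_cases h6 : "(3" = x
  · subst h6; decide
  by_cases h7 : ")3" = x
  · subst h7; decide
  simp [pvBrackets, PySem.Dict.getD, PySem.Dict.get?_mk_cons, PySem.Dict.get?,
    h0, h1, h2, h3, h4, h5, h6, h7,
    Ne.symm h0, Ne.symm h1, Ne.symm h2, Ne.symm h3,
    Ne.symm h4, Ne.symm h5, Ne.symm h6, Ne.symm h7]

-- ===== VERDICT (by name: the statement is the Claim_ definition above) =====
theorem change_encoding_spec : Claim_equal_change_encoding := by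
  intro structure_ _
  unfold Spec_change_encoding change_encoding change_encoding_alt
  simp only [List.map_map]
  apply List.map_congr_left
  intro x _
  simpa using change_encoding_pointwise x
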